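-- pv_equiv track=rewrite | github.com/arnabhalder0101/Python-Problems-Contest | MinNoOfMoves.py | moves_to_N
-- ===== SOURCE A (Python) =====
-- def moves_to_N(Num):
--     if Num == 1:
--         return 2
--
--     elif Num % 3 == 0:
--         return Num // 3
--
--     # elif Num % 5 == 0:
--     #     return Num // 5 * 2
--
--     elif Num % 2 == 0 and Num // 2 <= 2:
--         return Num // 2
--
--     else:
--         i = 0
--         while Num % 3 != 0:
--             i += 1
--             Num -= 1
--
--         # m = moves_to_N(Num)
--         if i == 1:
--             return Num // 3 + 1
--         elif i == 2:
--             return moves_to_N(Num) + 1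
-- ===== SOURCE B (Python) =====
-- def moves_to_N(Num):
--     q, r = divmod(Num, 3)
--     if r == 0:
--         return q
--     if Num == 1:
--         return 2
--     if Num % 2 == 0 and Num <= 5:
--         return Num // 2
--     return q + 1
-- ===== Notes on version B (the rewrite author's own statement) =====
-- stated objective: simpler
-- what changed: Replaces A's subtract-until-divisible while loop and the recursive call (for remainder 2) with one divmod and the closed form q+1, since both remainder paths collapse to floor(Num/3)+1.
import Mathlib
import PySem

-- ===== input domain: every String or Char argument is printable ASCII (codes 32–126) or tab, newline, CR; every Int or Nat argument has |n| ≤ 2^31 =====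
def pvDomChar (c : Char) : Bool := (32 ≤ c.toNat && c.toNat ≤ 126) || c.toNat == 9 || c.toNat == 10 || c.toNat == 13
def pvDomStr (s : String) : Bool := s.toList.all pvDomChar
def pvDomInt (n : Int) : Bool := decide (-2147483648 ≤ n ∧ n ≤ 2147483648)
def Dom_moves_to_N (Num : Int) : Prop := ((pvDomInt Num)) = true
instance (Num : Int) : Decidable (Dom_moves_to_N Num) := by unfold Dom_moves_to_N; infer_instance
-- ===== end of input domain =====

-- B replaces A's subtract-until-divisible loop and recursion with one divmod and a closed form (simpler).

-- ===== PORT A =====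
-- the `while Num % 3 != 0: i += 1; Num -= 1` loop, carrying state (i, Num).
-- The fuel is only a totality guard and never bites: Python's Num % 3 lies in {0,1,2},
-- so the loop stops within 2 iterations and fuel 3 always suffices.
def movesLoop : Nat → Int → Int → Int × Int
  | 0, i, Num => (i, Num)
  | fuel + 1, i, Num =>
      if PySem.Int.mod Num 3 ≠ 0 then movesLoop fuel (i + 1) (Num - 1) else (i, Num)

-- A's body; the fuel is only a totality guard and never bites: the recursive call's
-- argument is divisible by 3, so the recursion depth is at most 2.
def movesGo : Nat → Int → Int
  | 0, _ => 0
  | fuel + 1, Num =>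
      if Num = 1 then 2
      else if PySem.Int.mod Num 3 = 0 then PySem.Int.floordiv Num 3
      else if PySem.Int.mod Num 2 = 0 ∧ PySem.Int.floordiv Num 2 ≤ 2 then PySem.Int.floordiv Num 2
      else
        let p := movesLoop 3 0 Num
        if p.1 = 1 then PySem.Int.floordiv p.2 3 + 1
        else if p.1 = 2 then movesGo fuel p.2 + 1
        else 0  -- unreachable in Python (i is always 1 or 2 here); Python would fall off returning None

def moves_to_N (Num : Int) : Int := movesGo 2 Num

-- ===== PORT B =====
def moves_to_N_alt (Num : Int) : Int :=
  -- q, r = divmod(Num, 3)  (3 ≠ 0, so divmod is the floor quotient/remainder pair)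
  let q := PySem.Int.floordiv Num 3
  let r := PySem.Int.mod Num 3
  if r = 0 then q
  else if Num = 1 then 2
  else if PySem.Int.mod Num 2 = 0 ∧ Num ≤ 5 then PySem.Int.floordiv Num 2
  else q + 1

-- ===== PRECONDITION & SPEC =====
def Spec_moves_to_N (Num : Int) (out : Int) : Prop := out = moves_to_N_alt Num
instance (Num : Int) (out : Int) : Decidable (Spec_moves_to_N Num out) := by unfold Spec_moves_to_N; infer_instance

-- ===== CLAIM (what is proved, stated in full; the proofs are below) =====
def Claim_equal_moves_to_N : Prop := ∀ (Num : Int), Dom_moves_to_N Num → Spec_moves_to_N Num (moves_to_N Num)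

-- ===== LEMMAS AND PROOFS =====

theorem pymod3 (a : Int) : PySem.Int.mod a 3 = a % 3 := PySem.Int.mod_eq_emod_of_pos (by norm_num)
theorem pymod2 (a : Int) : PySem.Int.mod a 2 = a % 2 := PySem.Int.mod_eq_emod_of_pos (by norm_num)
theorem pyfdiv3 (a : Int) : PySem.Int.floordiv a 3 = a / 3 := PySem.Int.floordiv_eq_ediv_of_pos (by norm_num)
theorem pyfdiv2 (a : Int) : PySem.Int.floordiv a 2 = a / 2 := PySem.Int.floordiv_eq_ediv_of_pos (by norm_num)

-- the loop's result: it subtracts exactly Num % 3 ∈ {0,1,2} and counts the steps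
theorem movesLoop3_eq (Num : Int) : movesLoop 3 0 Num = (Num % 3, Num - Num % 3) := by
  rcases (show Num % 3 = 0 ∨ Num % 3 = 1 ∨ Num % 3 = 2 by omega) with h | h | h
  · rw [movesLoop, if_neg (by rw [pymod3]; omega), h]
    simp
  · have e1 : (Num - 1) % 3 = 0 := by omega
    rw [movesLoop, if_pos (by rw [pymod3]; omega),
      movesLoop, if_neg (by rw [pymod3]; omega), h]
    simp
  · have e1 : (Num - 1) % 3 = 1 := by omega
    have e2 : (Num - 1 - 1) % 3 = 0 := by omega
    rw [movesLoop, if_pos (by rw [pymod3]; omega),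
      movesLoop, if_pos (by rw [pymod3]; omega),
      movesLoop, if_neg (by rw [pymod3]; omega), h]
    simp only [Prod.mk.injEq]
    omega

theorem movesGo_div3 (fuel : Nat) (Num : Int) (h : Num % 3 = 0) :
    movesGo (fuel + 1) Num = Num / 3 := by
  have h1 : Num ≠ 1 := by omega
  rw [movesGo, if_neg h1, if_pos (show PySem.Int.mod Num 3 = 0 by rw [pymod3]; exact h), pyfdiv3]

theorem moves_to_N_spec' (Num : Int) : moves_to_N Num = moves_to_N_alt Num := by
  rw [moves_to_N, show (2 : Nat) = 1 + 1 from rfl]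
  by_cases h1 : Num = 1
  · subst h1
    rw [movesGo, if_pos rfl, moves_to_N_alt]
    norm_num [pymod3]
  rw [movesGo, moves_to_N_alt, movesLoop3_eq]
  simp only [pymod3, pymod2, pyfdiv3, pyfdiv2, if_neg h1]
  by_cases h3 : Num % 3 = 0
  · rw [if_pos h3, if_pos h3]
  rw [if_neg h3, if_neg h3]
  by_cases h2 : Num % 2 = 0 ∧ Num / 2 ≤ 2
  · have h2' : Num % 2 = 0 ∧ Num ≤ 5 := ⟨h2.1, by omega⟩
    rw [if_pos h2, if_pos h2']
  · have h2' : ¬(Num % 2 = 0 ∧ Num ≤ 5) := fun hc => h2 ⟨hc.1, by omega⟩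
    rw [if_neg h2, if_neg h2']
    by_cases hi1 : Num % 3 = 1
    · rw [if_pos hi1, hi1, show (Num - 1) / 3 = Num / 3 by omega]
    · have hi2 : Num % 3 = 2 := by omega
      rw [if_neg hi1, if_pos hi2, hi2,
        movesGo_div3 0 (Num - 2) (by omega),
        show (Num - 2) / 3 = Num / 3 by omega]

-- ===== VERDICT (by name: the statement is the Claim_ definition above) =====
theorem moves_to_N_spec : Claim_equal_moves_to_N := by
  intro Num _
  unfold Spec_moves_to_N
  exact moves_to_N_spec' Num
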